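-- pv_equiv track=rewrite | github.com/zhangmeishan/ELMo | src/biLM.py | break_sentence
-- ===== SOURCE A (Python) =====
-- def break_sentence(sentence, max_sent_len):
--   """
--   For example, for a sentence with 70 words, supposing the the `max_sent_len'
--   is 30, break it into 3 sentences.
--
--   :param sentence: list[str] the sentence
--   :param max_sent_len:
--   :return:
--   """
--   ret = []
--   cur = 0
--   l = len(sentence)
--   while cur < l:
--     if cur + max_sent_len + 5 >= l:
--       ret.append(sentence[cur: l])
--       break
--     ret.append(sentence[cur: min(l, cur + max_sent_len)])
--     cur += max_sent_len
--   return ret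
-- ===== SOURCE B (Python) =====
-- def break_sentence(sentence, max_sent_len):
--     chunks = [sentence[i:i + max_sent_len]
--               for i in range(0, len(sentence), max_sent_len)]
--     while len(chunks) >= 2 and len(chunks[-1]) <= 5:
--         tail = chunks.pop()
--         chunks[-1] = chunks[-1] + tail
--     return chunks
-- ===== Notes on version B (the rewrite author's own statement) =====
-- stated objective: simpler
-- what changed: B cuts the sentence into fixed-size chunks with one slice comprehension over range(0, n, max_sent_len) and then merges a short tail chunk (at most 5 words) into its predecessor, replacing A's scan-and-break cursor loop; Pre_ excludes non-positive max_sent_len (except the empty sentence with a negative one), where range raises or yields no chunks and A only returns on tiny inputs.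
-- outside the precondition, e.g. on break_sentence(['a'], 0): A returns [['a']], B raises ValueError; on break_sentence(['a'], -2): A returns [['a']], B returns []
import Mathlib
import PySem

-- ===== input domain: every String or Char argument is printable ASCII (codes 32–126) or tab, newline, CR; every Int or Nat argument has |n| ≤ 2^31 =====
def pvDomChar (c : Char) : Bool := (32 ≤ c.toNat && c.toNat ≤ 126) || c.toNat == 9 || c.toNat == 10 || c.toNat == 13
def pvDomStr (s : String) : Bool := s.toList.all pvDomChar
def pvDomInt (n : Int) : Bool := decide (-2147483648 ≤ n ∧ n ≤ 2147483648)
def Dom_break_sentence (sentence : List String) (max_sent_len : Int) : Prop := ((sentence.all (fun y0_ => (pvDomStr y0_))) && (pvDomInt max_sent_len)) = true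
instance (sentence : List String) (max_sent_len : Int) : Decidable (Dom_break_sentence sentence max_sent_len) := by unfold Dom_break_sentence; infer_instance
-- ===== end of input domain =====

-- B first cuts the sentence into fixed-size chunks with a slice comprehension, then merges a
-- short tail chunk (≤ 5 words) into its predecessor — replacing A's scan-and-break loop
-- (objective: simpler).

-- ===== PORT A =====
-- the while loop of A; fuel only makes it total (len(sentence) steps suffice on Pre_)
def pvBreakLoop (sentence : List String) (m l : Int) : Nat → Int → List (List String) → List (List String)
  | fuel, cur, ret =>
    if cur < l then
      if l ≤ cur + m + 5 then ret ++ [PySem.List.slice sentence (some cur) (some l)]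
      else
        match fuel with
        | 0 => ret
        | f + 1 => pvBreakLoop sentence m l f (cur + m) (ret ++ [PySem.List.slice sentence (some cur) (some (min l (cur + m)))])
    else ret

def break_sentence (sentence : List String) (max_sent_len : Int) : List (List String) :=
  let l : Int := PySem.List.len sentence
  pvBreakLoop sentence max_sent_len l sentence.length 0 []

-- ===== PORT B =====
-- Source B's while loop: pop the last chunk and append it to the new last one while it is short
def pvMergeTail (chunks : List (List String)) : List (List String) :=
  if h : 2 ≤ chunks.length ∧ (chunks.getLastD []).length ≤ 5 then
    pvMergeTail (chunks.dropLast.dropLast ++ [chunks.dropLast.getLastD [] ++ chunks.getLastD []])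
  else chunks
termination_by chunks.length
decreasing_by simp [List.length_dropLast]; omega

def break_sentence_alt (sentence : List String) (max_sent_len : Int) : List (List String) :=
  let chunks := (PySem.List.pyRange 0 (PySem.List.len sentence) max_sent_len).map
    (fun i => PySem.List.slice sentence (some i) (some (i + max_sent_len)))
  pvMergeTail chunks

-- ===== PRECONDITION & SPEC =====
-- Pre_ excludes non-positive max_sent_len (except on the empty sentence with a negative step,
-- where both return []): there Python's range raises ValueError (step 0) in B, B's chunking
-- yields no chunks (negative step), and A itself only returns when the sentence is tiny
-- (otherwise its cursor walks backwards forever) — a corner no caller specifies.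
def Pre_break_sentence (sentence : List String) (max_sent_len : Int) : Prop :=
  1 ≤ max_sent_len ∨ (sentence = [] ∧ max_sent_len ≠ 0)
instance (sentence : List String) (max_sent_len : Int) : Decidable (Pre_break_sentence sentence max_sent_len) := by unfold Pre_break_sentence; infer_instance
def pvWitness_break_sentence : List String × Int := (["a", "b", "c"], 1)

def Spec_break_sentence (sentence : List String) (max_sent_len : Int) (out : List (List String)) : Prop := out = break_sentence_alt sentence max_sent_len
instance (sentence : List String) (max_sent_len : Int) (out : List (List String)) : Decidable (Spec_break_sentence sentence max_sent_len out) := by unfold Spec_break_sentence; infer_instance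

-- ===== CLAIM (what is proved, stated in full; the proofs are below) =====
def Claim_equal_break_sentence : Prop := ∀ (sentence : List String) (max_sent_len : Int), Dom_break_sentence sentence max_sent_len → Pre_break_sentence sentence max_sent_len → Spec_break_sentence sentence max_sent_len (break_sentence sentence max_sent_len)

-- ===== LEMMAS AND PROOFS =====

-- the chunk list A's loop still has to produce from position `cur`
def pvChunksFrom (sentence : List String) (m l : Int) : Nat → Int → List (List String)
  | fuel, cur =>
    if cur < l then
      if l ≤ cur + m + 5 then [PySem.List.slice sentence (some cur) (some l)]
      else
        match fuel with
        | 0 => []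
        | f + 1 => PySem.List.slice sentence (some cur) (some (min l (cur + m))) :: pvChunksFrom sentence m l f (cur + m)
    else []

theorem pvBreakLoop_eq_chunksFrom (sentence : List String) (m l : Int) :
    ∀ (fuel : Nat) (cur : Int) (ret : List (List String)),
    pvBreakLoop sentence m l fuel cur ret = ret ++ pvChunksFrom sentence m l fuel cur := by
  intro fuel
  induction fuel with
  | zero =>
    intro cur ret
    simp only [pvBreakLoop, pvChunksFrom]
    split_ifs <;> simp
  | succ f ih =>
    intro cur ret
    simp only [pvBreakLoop, pvChunksFrom]
    split_ifs <;> simp [ih]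

theorem pvChunksFrom_closed (sentence : List String) (m l : Int) (_hm : 1 ≤ m) :
    ∀ (k : Nat) (fuel : Nat) (cur : Int), cur < l → l ≤ cur + (k : Int) * m + m + 5 →
    (∀ j : Nat, j < k → cur + (j : Int) * m + m + 5 < l) → k ≤ fuel →
    pvChunksFrom sentence m l fuel cur =
      (List.range k).map (fun (i : Nat) => PySem.List.slice sentence (some (cur + (i : Int) * m)) (some (cur + (i : Int) * m + m)))
        ++ [PySem.List.slice sentence (some (cur + (k : Int) * m)) (some l)] := by
  intro k
  induction k with
  | zero =>
    intro fuel cur hcl hk _ _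
    rw [pvChunksFrom.eq_def]
    dsimp only
    rw [if_pos hcl, if_pos (by push_cast at hk ⊢; omega)]
    simp
  | succ k ih =>
    intro fuel cur hcl hk hlt hfuel
    have h0 : cur + m + 5 < l := by
      have := hlt 0 (Nat.succ_pos k); simpa using this
    obtain ⟨f, rfl⟩ : ∃ f, fuel = f + 1 := ⟨fuel - 1, by omega⟩
    simp only [pvChunksFrom]
    rw [if_pos hcl, if_neg (by omega)]
    have hmin : min l (cur + m) = cur + m := by omega
    rw [hmin, ih f (cur + m) (by omega) (by push_cast at hk ⊢; linarith) ?_ (by omega)]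
    · rw [List.range_succ_eq_map, List.map_cons, List.map_map]
      rw [List.cons_append]
      congr 1
      · norm_num
      congr 1
      · apply List.map_congr_left
        intro i _
        simp only [Function.comp]
        push_cast
        ring_nf
      · congr 2
        push_cast
        ring_nf
    · intro j hj
      have := hlt (j + 1) (by omega)
      push_cast at this ⊢
      linarith

-- the i-th full chunk and the canonical "k full chunks + tail" shape both programs reach
def pvFull (sentence : List String) (μ i : Nat) : List String := (sentence.drop (i * μ)).take μ
def pvT (sentence : List String) (μ k : Nat) : List (List String) :=
  (List.range k).map (pvFull sentence μ) ++ [sentence.drop (k * μ)]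

theorem pvMergeTail_T (sentence : List String) (μ kA : Nat) (hμ : 1 ≤ μ)
    (hmin : ∀ j, j < kA → j * μ + μ + 5 < sentence.length)
    (hup : sentence.length ≤ kA * μ + μ + 5) :
    ∀ (d : Nat), (kA + d) * μ < sentence.length →
    pvMergeTail (pvT sentence μ (kA + d)) = pvT sentence μ kA := by
  intro d
  induction d with
  | zero =>
    intro _hklen
    have hnc : ¬(2 ≤ (pvT sentence μ (kA + 0)).length ∧
        ((pvT sentence μ (kA + 0)).getLastD []).length ≤ 5) := by
      rcases Nat.eq_zero_or_pos kA with h0 | hpos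
      · simp [pvT, h0]
      · rintro ⟨_, hcond⟩
        have htail : (pvT sentence μ (kA + 0)).getLastD [] = sentence.drop ((kA + 0) * μ) := by
          simp [pvT, List.getLastD_concat]
        rw [htail, List.length_drop] at hcond
        have hb : (kA + 0) * μ = kA * μ := by norm_num
        rw [hb] at hcond
        have := hmin (kA - 1) (by omega)
        have hkm : (kA - 1) * μ + μ = kA * μ := by
          cases kA with
          | zero => omega
          | succ k' => simp [Nat.succ_mul]
        omega
    rw [pvMergeTail.eq_def, dif_neg hnc]
    norm_num
  | succ d ih =>
    intro hklen
    have hkm : (kA + (d + 1)) * μ = (kA + d) * μ + μ := by ring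
    have hdrop : pvFull sentence μ (kA + d) ++ sentence.drop ((kA + (d + 1)) * μ)
        = sentence.drop ((kA + d) * μ) := by
      rw [pvFull, hkm, ← List.drop_drop]
      exact List.take_append_drop μ _
    have e1 : (pvT sentence μ (kA + (d + 1))).dropLast
        = (List.range (kA + (d + 1))).map (pvFull sentence μ) := by
      simp [pvT, List.dropLast_concat]
    have e2 : (pvT sentence μ (kA + (d + 1))).getLastD []
        = sentence.drop ((kA + (d + 1)) * μ) := by
      simp [pvT, List.getLastD_concat]
    have hrange : List.range (kA + (d + 1))
        = List.range (kA + d) ++ [kA + d] := by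
      have : kA + (d + 1) = (kA + d) + 1 := by omega
      rw [this, List.range_succ]
    rw [pvMergeTail.eq_def, dif_pos ?_]
    · rw [e1, e2, hrange, List.map_append, List.map_singleton, List.dropLast_concat,
        List.getLastD_concat, hdrop]
      exact ih (by omega)
    · refine ⟨by simp [pvT]; omega, ?_⟩
      rw [e2, List.length_drop]
      have hmono : kA * μ + μ ≤ (kA + (d + 1)) * μ := by
        have : (kA + 1) * μ ≤ (kA + (d + 1)) * μ := Nat.mul_le_mul_right μ (by omega)
        simpa [Nat.succ_mul] using this
      omega

theorem pvMergeTail_nil : pvMergeTail [] = [] := by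
  rw [pvMergeTail.eq_def, dif_neg]
  simp

theorem break_sentence_spec : Claim_equal_break_sentence := by
  intro sentence m _ hpre
  unfold Spec_break_sentence break_sentence break_sentence_alt
  simp only [PySem.List.len_eq]
  by_cases hnil : sentence = []
  · subst hnil
    have hr : PySem.List.pyRange 0 ((([] : List String).length : Int)) m = [] := by
      simp [PySem.List.pyRange]
    rw [hr]
    simp only [List.map_nil, pvMergeTail_nil]
    rw [pvBreakLoop.eq_def]
    norm_num
  · have hm : 1 ≤ m := by
      rcases hpre with h | ⟨h, _⟩
      · exact h
      · exact absurd h hnil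
    lift m to ℕ using (by omega : (0:ℤ) ≤ m) with μ
    have hμ : 1 ≤ μ := by exact_mod_cast hm
    set n' := sentence.length with hn'def
    have hn' : 1 ≤ n' := List.length_pos_of_ne_nil hnil
    -- kA = the number of full chunks A emits: minimal k with n' ≤ k·μ + μ + 5
    have hPex : ∃ k, n' ≤ k * μ + μ + 5 := ⟨n', by nlinarith [Nat.le_mul_of_pos_right n' (by omega : 0 < μ)]⟩
    set kA := Nat.find hPex with hkAdef
    have hup : n' ≤ kA * μ + μ + 5 := Nat.find_spec hPex
    have hmin : ∀ j, j < kA → j * μ + μ + 5 < n' := fun j hj => by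
      have := Nat.find_min hPex hj; omega
    have hkAn : kA ≤ n' := Nat.find_le (by nlinarith [Nat.le_mul_of_pos_right n' (by omega : 0 < μ)])
    -- A's side: the loop's closed form is pvT kA
    have hA : pvBreakLoop sentence (μ:Int) (n' : Int) sentence.length 0 [] = pvT sentence μ kA := by
      rw [pvBreakLoop_eq_chunksFrom, List.nil_append]
      rw [pvChunksFrom_closed sentence (μ:Int) (n' : Int) hm kA sentence.length 0
        (by exact_mod_cast hn') (by push_cast; omega)
        (by intro j hj; have := hmin j hj; push_cast; omega) hkAn]
      unfold pvT
      congr 1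
      · apply List.map_congr_left
        intro i _
        have h1 : (0:Int) + (i:Int) * (μ:Int) = ((i * μ : Nat) : Int) := by push_cast; ring
        have h2 : ((i * μ : Nat) : Int) + (μ:Int) = ((i * μ + μ : Nat) : Int) := by push_cast; ring
        rw [h1, h2, PySem.List.slice_natCast]
        unfold pvFull
        congr 1
        omega
      · have h1 : (0:Int) + (kA:Int) * (μ:Int) = ((kA * μ : Nat) : Int) := by push_cast; ring
        rw [h1, PySem.List.slice_natCast]
        rw [List.take_of_length_le (by rw [List.length_drop])]
    -- B's side: the chunk comprehension is pvT (q-1), q = ceil(n'/μ)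
    have hq0 : (0:Int) < (μ:Int) := by omega
    set qI : Int := ((n' : Int) - 0 + (μ:Int) - 1) / (μ:Int) with hqIdef
    have hqI : qI * (μ:Int) ≤ (n' : Int) + (μ:Int) - 1 ∧ (n' : Int) + (μ:Int) - 1 < (qI + 1) * (μ:Int) := by
      have h := (PySem.Int.floordiv_eq_iff_of_pos (a := (n' : Int) + (μ:Int) - 1) (b := (μ:Int)) (q := qI) hq0).mp
        (by rw [PySem.Int.floordiv_eq_ediv_of_pos hq0, hqIdef]; norm_num)
      exact h
    have hqI1 : 1 ≤ qI := by nlinarith [hqI.1, hqI.2]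
    set q : ℕ := qI.toNat with hqdef
    have hqcast : (q : Int) = qI := Int.toNat_of_nonneg (by omega)
    have hqn : n' ≤ q * μ := by
      have : (n' : Int) ≤ (q : Int) * (μ:Int) := by rw [hqcast]; nlinarith [hqI.2]
      exact_mod_cast this
    have hq2 : (q - 1) * μ < n' := by
      have hcast : ((q - 1 : Nat) : Int) = qI - 1 := by push_cast [hqcast]; omega
      have : ((q - 1 : Nat) : Int) * (μ:Int) < (n' : Int) := by rw [hcast]; nlinarith [hqI.1]
      exact_mod_cast this
    have hq1 : 1 ≤ q := by omega
    have hB : (PySem.List.pyRange 0 (n' : Int) (μ:Int)).map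
        (fun i => PySem.List.slice sentence (some i) (some (i + (μ:Int)))) = pvT sentence μ (q - 1) := by
      rw [PySem.List.pyRange_of_pos 0 (n' : Int) hq0]
      rw [if_pos (by exact_mod_cast hn')]
      rw [List.map_map, ← hqIdef, ← hqdef]
      have hfull : ∀ i : Nat, PySem.List.slice sentence (some (0 + (μ:Int) * (i:Int)))
          (some (0 + (μ:Int) * (i:Int) + (μ:Int))) = pvFull sentence μ i := by
        intro i
        have h1 : (0:Int) + (μ:Int) * (i:Int) = ((i * μ : Nat) : Int) := by push_cast; ring
        have h2 : ((i * μ : Nat) : Int) + (μ:Int) = ((i * μ + μ : Nat) : Int) := by push_cast; ring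
        rw [h1, h2, PySem.List.slice_natCast]
        unfold pvFull
        congr 1
        omega
      have : List.range q = List.range (q - 1) ++ [q - 1] := by
        have h : q = (q - 1) + 1 := by omega
        conv_lhs => rw [h, List.range_succ]
      rw [this, List.map_append, List.map_singleton]
      unfold pvT
      congr 1
      · apply List.map_congr_left
        intro i _
        simp only [Function.comp_apply]
        exact hfull i
      · simp only [Function.comp_apply]
        rw [hfull (q - 1)]
        unfold pvFull
        rw [List.take_of_length_le]
        rw [List.length_drop]
        have hqq : (q - 1) * μ + μ = q * μ := by
          conv_rhs => rw [show q = (q - 1) + 1 from by omega]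
          rw [Nat.succ_mul]
        omega
    rw [hA, hB]
    -- merge the short tail chunks: pvMergeTail (pvT (q-1)) = pvT kA
    have hkAq : kA ≤ q - 1 := by
      by_contra hcon
      have h := hmin (q - 1) (by omega)
      have hqq : (q - 1) * μ + μ = q * μ := by
        conv_rhs => rw [show q = (q - 1) + 1 from by omega]
        rw [Nat.succ_mul]
      omega
    have := pvMergeTail_T sentence μ kA hμ hmin hup ((q - 1) - kA)
      (by rw [Nat.add_sub_cancel' hkAq]; exact hq2)
    rw [Nat.add_sub_cancel' hkAq] at this
    rw [this]
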